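-- pv_equiv track=rewrite | github.com/naemhui/SSAFY_ALgorithm | [1주차] 추가 문제/balloon_2.py | max_ballon
-- ===== SOURCE A (Python) =====
-- def is_valid(i, j, n, m):
--     return 0 <= i < n and 0 <= j < m
--
-- def max_ballon(arr, n, m):
--     max_v = 0
--     # 방향 벡터
--     di = [-1, 1, 0, 0]
--     dj = [0, 0, -1, 1]
--
--     for i in range(n):
--         for j in range(m):
--             total = arr[i][j]
--             # 4방향 탐색
--             for d in range(4):
--                 ni = i + di[d]
--                 nj = j + dj[d]
--                 if is_valid(ni, nj, n, m):
--                     total += arr[ni][nj]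
--             # 최대값 갱신
--             if total > max_v:
--                 max_v = total
--     return max_v
-- ===== SOURCE B (Python) =====
-- def max_ballon(arr, n, m):
--     # scatter/accumulator: copy the n x m region, then push each cell's value
--     # onto its in-bounds neighbours, finally take the running max (floored at 0)
--     tot = [[arr[i][j] for j in range(m)] for i in range(n)]
--     for i in range(n):
--         for j in range(m):
--             v = arr[i][j]
--             if i > 0:
--                 tot[i - 1][j] += v
--             if i + 1 < n:
--                 tot[i + 1][j] += v
--             if j > 0:
--                 tot[i][j - 1] += v
--             if j + 1 < m:
--                 tot[i][j + 1] += v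
--     best = 0
--     for row in tot:
--         for x in row:
--             if x > best:
--                 best = x
--     return best
-- ===== Notes on version B (the rewrite author's own statement) =====
-- stated objective: alternative
-- what changed: Replaces A's per-cell gather over direction vectors by a scatter pass that maintains an accumulator grid (each cell's value is added to its in-bounds neighbours) followed by a separate max pass.
import Mathlib
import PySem

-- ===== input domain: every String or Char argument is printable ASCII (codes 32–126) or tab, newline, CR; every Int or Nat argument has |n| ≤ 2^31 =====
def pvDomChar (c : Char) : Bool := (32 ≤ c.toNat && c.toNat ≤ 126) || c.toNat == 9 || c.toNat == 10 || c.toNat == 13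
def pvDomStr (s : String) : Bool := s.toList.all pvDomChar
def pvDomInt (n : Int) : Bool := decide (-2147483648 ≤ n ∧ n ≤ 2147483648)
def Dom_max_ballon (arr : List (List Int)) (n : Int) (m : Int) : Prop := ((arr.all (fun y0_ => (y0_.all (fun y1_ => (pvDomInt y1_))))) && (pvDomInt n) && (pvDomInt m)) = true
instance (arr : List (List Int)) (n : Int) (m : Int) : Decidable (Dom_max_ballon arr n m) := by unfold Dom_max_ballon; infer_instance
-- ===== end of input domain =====

-- B replaces A's per-cell gather over direction vectors by a scatter pass onto an
-- accumulator grid followed by a separate max pass (objective: alternative, same cost).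

-- ===== PORT A =====
def is_valid (i : Int) (j : Int) (n : Int) (m : Int) : Bool :=
  (decide (0 ≤ i) && decide (i < n)) && (decide (0 ≤ j) && decide (j < m))

def max_ballon (arr : List (List Int)) (n : Int) (m : Int) : Int :=
  let di : List Int := [-1, 1, 0, 0]
  let dj : List Int := [0, 0, -1, 1]
  (PySem.List.pyRange 0 n 1).foldl (fun max_v i =>
    (PySem.List.pyRange 0 m 1).foldl (fun max_v j =>
      let total := PySem.List.pyGetD (PySem.List.pyGetD arr i []) j 0
      let total := (PySem.List.pyRange 0 4 1).foldl (fun total d =>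
        let ni := i + PySem.List.pyGetD di d 0
        let nj := j + PySem.List.pyGetD dj d 0
        if is_valid ni nj n m then
          total + PySem.List.pyGetD (PySem.List.pyGetD arr ni []) nj 0
        else total) total
      if total > max_v then total else max_v) max_v) 0

-- ===== PORT B =====
-- 'tot[i][j] += v' (row fetched, entry replaced, row written back)
def addAt (g : List (List Int)) (i : Int) (j : Int) (v : Int) : List (List Int) :=
  PySem.List.pySetD g i
    (PySem.List.pySetD (PySem.List.pyGetD g i []) j
      (PySem.List.pyGetD (PySem.List.pyGetD g i []) j 0 + v))

def max_ballon_alt (arr : List (List Int)) (n : Int) (m : Int) : Int :=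
  let tot := (PySem.List.pyRange 0 n 1).map (fun i =>
    (PySem.List.pyRange 0 m 1).map (fun j =>
      PySem.List.pyGetD (PySem.List.pyGetD arr i []) j 0))
  let tot := (PySem.List.pyRange 0 n 1).foldl (fun tot i =>
    (PySem.List.pyRange 0 m 1).foldl (fun tot j =>
      let v := PySem.List.pyGetD (PySem.List.pyGetD arr i []) j 0
      let tot := if 0 < i then addAt tot (i - 1) j v else tot
      let tot := if i + 1 < n then addAt tot (i + 1) j v else tot
      let tot := if 0 < j then addAt tot i (j - 1) v else tot
      if j + 1 < m then addAt tot i (j + 1) v else tot) tot) tot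
  tot.foldl (fun best row =>
    row.foldl (fun best x => if x > best then x else best) best) 0

-- ===== PRECONDITION & SPEC =====
-- Pre: when both dimensions are positive, arr must have at least n rows and each of its
-- first n rows at least m entries — exactly where Python A avoids an IndexError.
def Pre_max_ballon (arr : List (List Int)) (n : Int) (m : Int) : Prop :=
  0 < n → 0 < m → n ≤ (arr.length : Int) ∧ ∀ r ∈ arr.take n.toNat, m ≤ (r.length : Int)
instance (arr : List (List Int)) (n : Int) (m : Int) : Decidable (Pre_max_ballon arr n m) := by
  unfold Pre_max_ballon; infer_instance

def pvWitness_max_ballon : List (List Int) × Int × Int := ([[1, 2], [3, 4]], 2, 2)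

def Spec_max_ballon (arr : List (List Int)) (n : Int) (m : Int) (out : Int) : Prop := out = max_ballon_alt arr n m
instance (arr : List (List Int)) (n : Int) (m : Int) (out : Int) : Decidable (Spec_max_ballon arr n m out) := by unfold Spec_max_ballon; infer_instance

-- ===== CLAIM (what is proved, stated in full; the proofs are below) =====
def Claim_equal_max_ballon : Prop := ∀ (arr : List (List Int)) (n : Int) (m : Int), Dom_max_ballon arr n m → Pre_max_ballon arr n m → Spec_max_ballon arr n m (max_ballon arr n m)


-- ===== LEMMAS AND PROOFS =====

-- the value of cell (i, j) of a grid, 0 outside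
def cell (g : List (List Int)) (i : Int) (j : Int) : Int :=
  PySem.List.pyGetD (PySem.List.pyGetD g i []) j 0

-- the common shape of the two final max loops
def loopMax (t : Int → Int → Int) (n : Int) (m : Int) : Int :=
  (PySem.List.pyRange 0 n 1).foldl (fun mv i =>
    (PySem.List.pyRange 0 m 1).foldl (fun mv j =>
      if t i j > mv then t i j else mv) mv) 0

-- A's per-cell gathered total, in the exact form A's direction loop produces
def TA (arr : List (List Int)) (n : Int) (m : Int) (i : Int) (j : Int) : Int :=
  let t0 := cell arr i j
  let t1 := if is_valid (i + -1) (j + 0) n m then t0 + cell arr (i + -1) (j + 0) else t0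
  let t2 := if is_valid (i + 1) (j + 0) n m then t1 + cell arr (i + 1) (j + 0) else t1
  let t3 := if is_valid (i + 0) (j + -1) n m then t2 + cell arr (i + 0) (j + -1) else t2
  if is_valid (i + 0) (j + 1) n m then t3 + cell arr (i + 0) (j + 1) else t3

-- B's per-cell total: the value gathered by the scatter pass
def TB (arr : List (List Int)) (n : Int) (m : Int) (p : Int) (q : Int) : Int :=
  cell arr p q
  + ((if p + 1 < n then cell arr (p + 1) q else 0)
  + (if 0 < p then cell arr (p - 1) q else 0)
  + (if q + 1 < m then cell arr p (q + 1) else 0)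
  + (if 0 < q then cell arr p (q - 1) else 0))

-- one scatter step of B (the body of B's double loop)
def stepB (arr : List (List Int)) (n : Int) (m : Int) (tot : List (List Int)) (i : Int) (j : Int) : List (List Int) :=
  let v := PySem.List.pyGetD (PySem.List.pyGetD arr i []) j 0
  let tot := if 0 < i then addAt tot (i - 1) j v else tot
  let tot := if i + 1 < n then addAt tot (i + 1) j v else tot
  let tot := if 0 < j then addAt tot i (j - 1) v else tot
  if j + 1 < m then addAt tot i (j + 1) v else tot

-- what one scatter step at (i, j) adds to cell (p, q)
def contrib (arr : List (List Int)) (i : Int) (j : Int) (p : Int) (q : Int) : Int :=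
  (if i = p + 1 ∧ j = q then cell arr i j else 0)
  + (if i = p - 1 ∧ j = q then cell arr i j else 0)
  + (if i = p ∧ j = q + 1 then cell arr i j else 0)
  + (if i = p ∧ j = q - 1 then cell arr i j else 0)

def Shape (g : List (List Int)) (n : Int) (m : Int) : Prop :=
  g.length = n.toNat ∧ ∀ r ∈ g, r.length = m.toNat

theorem pyGetD_oob {α : Type} (xs : List α) (i : Int) (d : α) (h : (xs.length : Int) ≤ i) :
    PySem.List.pyGetD xs i d = d := by
  apply PySem.List.pyGetD_of_none
  rw [PySem.List.pyGet?_eq_none_iff]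
  simp [PySem.Raise.InRange]; omega

theorem cell_addAt (g : List (List Int)) (n m a b v p q : Int)
    (hS : Shape g n m) (ha : 0 ≤ a) (ha' : a < n) (hb : 0 ≤ b) (hb' : b < m)
    (hp : 0 ≤ p) (hq : 0 ≤ q) :
    cell (addAt g a b v) p q = cell g p q + (if p = a ∧ q = b then v else 0) := by
  obtain ⟨hlen, hrow⟩ := hS
  have hIR : PySem.Raise.InRange g.length a := by simp [PySem.Raise.InRange]; omega
  have hrm : PySem.List.pyGetD g a ([] : List Int) ∈ g := PySem.List.pyGetD_mem g [] hIR
  have hrl : (PySem.List.pyGetD g a ([] : List Int)).length = m.toNat := hrow _ hrm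
  unfold addAt cell
  rw [PySem.List.pySetD_of_nonneg _ _ ha, PySem.List.pySetD_of_nonneg _ _ hb]
  have houter : PySem.List.pyGetD
      (g.set a.toNat ((PySem.List.pyGetD g a ([] : List Int)).set b.toNat
        (PySem.List.pyGetD (PySem.List.pyGetD g a ([] : List Int)) b 0 + v))) p ([] : List Int)
      = if p = a then ((PySem.List.pyGetD g a ([] : List Int)).set b.toNat
        (PySem.List.pyGetD (PySem.List.pyGetD g a ([] : List Int)) b 0 + v))
        else PySem.List.pyGetD g p ([] : List Int) := by
    by_cases hpa : p = a
    · rw [if_pos hpa, hpa,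
        PySem.List.pyGetD_eq_getElem _ _ ha (by simp only [List.length_set]; omega),
        List.getElem_set_self]
    · rw [if_neg hpa]
      by_cases hpl : p < (g.length : Int)
      · rw [PySem.List.pyGetD_eq_getElem _ _ hp (by simp only [List.length_set]; omega),
          PySem.List.pyGetD_eq_getElem _ _ hp hpl, List.getElem_set_ne (by omega)]
      · rw [pyGetD_oob _ _ _ (by simp only [List.length_set]; omega), pyGetD_oob _ _ _ (by omega)]
  rw [houter]
  by_cases hpa : p = a
  · rw [if_pos hpa]
    have hinner : PySem.List.pyGetD ((PySem.List.pyGetD g a ([] : List Int)).set b.toNat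
        (PySem.List.pyGetD (PySem.List.pyGetD g a ([] : List Int)) b 0 + v)) q 0
        = if q = b then PySem.List.pyGetD (PySem.List.pyGetD g a ([] : List Int)) b 0 + v
          else PySem.List.pyGetD (PySem.List.pyGetD g a ([] : List Int)) q 0 := by
      by_cases hqb : q = b
      · rw [if_pos hqb, hqb,
          PySem.List.pyGetD_eq_getElem _ _ hb (by simp only [List.length_set]; omega),
          List.getElem_set_self]
      · rw [if_neg hqb]
        by_cases hql : q < ((PySem.List.pyGetD g a ([] : List Int)).length : Int)
        · rw [PySem.List.pyGetD_eq_getElem _ _ hq (by simp only [List.length_set]; omega),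
            PySem.List.pyGetD_eq_getElem _ _ hq hql, List.getElem_set_ne (by omega)]
        · rw [pyGetD_oob _ _ _ (by simp only [List.length_set]; omega), pyGetD_oob _ _ _ (by omega)]
    rw [hinner, hpa]
    by_cases hqb : q = b
    · rw [hqb]; simp
    · simp [hqb]
  · rw [if_neg hpa]; simp [hpa]

theorem shape_addAt (g : List (List Int)) (n m a b v : Int)
    (hS : Shape g n m) (ha : 0 ≤ a) (ha' : a < n) (hb : 0 ≤ b) (_hb' : b < m) :
    Shape (addAt g a b v) n m := by
  obtain ⟨hlen, hrow⟩ := hS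
  have hIR : PySem.Raise.InRange g.length a := by simp [PySem.Raise.InRange]; omega
  have hrm : PySem.List.pyGetD g a ([] : List Int) ∈ g := PySem.List.pyGetD_mem g [] hIR
  unfold addAt
  rw [PySem.List.pySetD_of_nonneg _ _ ha, PySem.List.pySetD_of_nonneg _ _ hb]
  constructor
  · simp [hlen]
  · intro r hr
    rcases List.mem_or_eq_of_mem_set hr with h | h
    · exact hrow r h
    · subst h; rw [List.length_set]; exact hrow _ hrm

theorem shape_optAdd (g : List (List Int)) (n m a b v : Int) (c : Prop) [Decidable c]
    (hS : Shape g n m) (hab : c → 0 ≤ a ∧ a < n ∧ 0 ≤ b ∧ b < m) :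
    Shape (if c then addAt g a b v else g) n m := by
  by_cases h : c
  · obtain ⟨h1, h2, h3, h4⟩ := hab h
    rw [if_pos h]; exact shape_addAt g n m a b v hS h1 h2 h3 h4
  · rw [if_neg h]; exact hS

theorem cell_optAdd (g : List (List Int)) (n m a b v p q : Int) (c : Prop) [Decidable c]
    (hS : Shape g n m) (hab : c → 0 ≤ a ∧ a < n ∧ 0 ≤ b ∧ b < m)
    (hp : 0 ≤ p) (hq : 0 ≤ q) :
    cell (if c then addAt g a b v else g) p q
      = cell g p q + (if c ∧ p = a ∧ q = b then v else 0) := by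
  by_cases h : c
  · obtain ⟨h1, h2, h3, h4⟩ := hab h
    rw [if_pos h, cell_addAt g n m a b v p q hS h1 h2 h3 h4 hp hq]
    simp [h]
  · rw [if_neg h]; simp [h]

theorem stepB_shape (arr : List (List Int)) (n m : Int) (tot : List (List Int)) (i j : Int)
    (hS : Shape tot n m) (hi : 0 ≤ i) (hi' : i < n) (hj : 0 ≤ j) (hj' : j < m) :
    Shape (stepB arr n m tot i j) n m := by
  unfold stepB
  apply shape_optAdd _ n m _ _ _ _ (shape_optAdd _ n m _ _ _ _ (shape_optAdd _ n m _ _ _ _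
    (shape_optAdd _ n m _ _ _ _ hS (fun h => by omega)) (fun h => by omega)) (fun h => by omega))
    (fun h => by omega)

theorem stepB_cell (arr : List (List Int)) (n m : Int) (tot : List (List Int)) (i j p q : Int)
    (hS : Shape tot n m) (hi : 0 ≤ i) (hi' : i < n) (hj : 0 ≤ j) (hj' : j < m)
    (hp : 0 ≤ p) (hp' : p < n) (hq : 0 ≤ q) (hq' : q < m) :
    cell (stepB arr n m tot i j) p q = cell tot p q + contrib arr i j p q := by
  unfold stepB
  have s1 : Shape (if 0 < i then addAt tot (i - 1) j (PySem.List.pyGetD (PySem.List.pyGetD arr i []) j 0) else tot) n m :=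
    shape_optAdd _ n m _ _ _ _ hS (fun h => by omega)
  have s2 : Shape (if i + 1 < n then addAt _ (i + 1) j (PySem.List.pyGetD (PySem.List.pyGetD arr i []) j 0) else _) n m :=
    shape_optAdd _ n m _ _ _ _ s1 (fun h => by omega)
  have s3 : Shape (if 0 < j then addAt _ i (j - 1) (PySem.List.pyGetD (PySem.List.pyGetD arr i []) j 0) else _) n m :=
    shape_optAdd _ n m _ _ _ _ s2 (fun h => by omega)
  rw [cell_optAdd _ n m _ _ _ _ _ _ s3 (fun h => by omega) hp hq,
      cell_optAdd _ n m _ _ _ _ _ _ s2 (fun h => by omega) hp hq,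
      cell_optAdd _ n m _ _ _ _ _ _ s1 (fun h => by omega) hp hq,
      cell_optAdd _ n m _ _ _ _ _ _ hS (fun h => by omega) hp hq]
  have hvc : PySem.List.pyGetD (PySem.List.pyGetD arr i []) j 0 = cell arr i j := rfl
  rw [hvc]
  unfold contrib
  split_ifs <;> omega

theorem inner_inv (arr : List (List Int)) (n m i : Int) (hi : 0 ≤ i) (hi' : i < n)
    (js : List Int) (tot : List (List Int)) (hS : Shape tot n m)
    (hjs : ∀ j ∈ js, 0 ≤ j ∧ j < m) :
    Shape (js.foldl (fun tot j => stepB arr n m tot i j) tot) n m ∧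
    ∀ p q, 0 ≤ p → p < n → 0 ≤ q → q < m →
      cell (js.foldl (fun tot j => stepB arr n m tot i j) tot) p q
        = cell tot p q + (js.map (fun j => contrib arr i j p q)).sum := by
  induction js generalizing tot with
  | nil => exact ⟨hS, fun p q _ _ _ _ => by simp⟩
  | cons x t ih =>
    obtain ⟨hx0, hx1⟩ := hjs x (List.mem_cons_self ..)
    have hSx := stepB_shape arr n m tot i x hS hi hi' hx0 hx1
    obtain ⟨ihS, ihC⟩ := ih (stepB arr n m tot i x) hSx (fun j hj => hjs j (List.mem_cons_of_mem _ hj))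
    refine ⟨by simpa using ihS, fun p q hp hp' hq hq' => ?_⟩
    rw [List.foldl_cons, ihC p q hp hp' hq hq',
        stepB_cell arr n m tot i x p q hS hi hi' hx0 hx1 hp hp' hq hq',
        List.map_cons, List.sum_cons]
    ring

theorem outer_inv (arr : List (List Int)) (n m : Int)
    (is : List Int) (tot : List (List Int)) (hS : Shape tot n m)
    (his : ∀ i ∈ is, 0 ≤ i ∧ i < n) :
    Shape (is.foldl (fun tot i => (PySem.List.pyRange 0 m 1).foldl (fun tot j => stepB arr n m tot i j) tot) tot) n m ∧
    ∀ p q, 0 ≤ p → p < n → 0 ≤ q → q < m →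
      cell (is.foldl (fun tot i => (PySem.List.pyRange 0 m 1).foldl (fun tot j => stepB arr n m tot i j) tot) tot) p q
        = cell tot p q + (is.map (fun i => ((PySem.List.pyRange 0 m 1).map (fun j => contrib arr i j p q)).sum)).sum := by
  induction is generalizing tot with
  | nil => exact ⟨hS, fun p q _ _ _ _ => by simp⟩
  | cons x t ih =>
    obtain ⟨hx0, hx1⟩ := his x (List.mem_cons_self ..)
    have hbnd : ∀ j ∈ PySem.List.pyRange 0 m 1, 0 ≤ j ∧ j < m := by
      intro j hj; exact PySem.List.mem_pyRange_one.mp hj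
    obtain ⟨hS1, hC1⟩ := inner_inv arr n m x hx0 hx1 (PySem.List.pyRange 0 m 1) tot hS hbnd
    obtain ⟨ihS, ihC⟩ := ih ((PySem.List.pyRange 0 m 1).foldl (fun tot j => stepB arr n m tot x j) tot) hS1
      (fun i hi => his i (List.mem_cons_of_mem _ hi))
    refine ⟨by simpa using ihS, fun p q hp hp' hq hq' => ?_⟩
    rw [List.foldl_cons, ihC p q hp hp' hq hq', hC1 p q hp hp' hq hq',
        List.map_cons, List.sum_cons]
    ring

theorem sum_point (l : List Int) (hl : l.Nodup) (c : Int) (P : Prop) [Decidable P] (w : Int → Int) :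
    (l.map (fun x => if P ∧ x = c then w x else 0)).sum = if P ∧ c ∈ l then w c else 0 := by
  induction l with
  | nil => simp
  | cons x t ih =>
    have hx' : x ∉ t := (List.nodup_cons.mp hl).1
    rw [List.map_cons, List.sum_cons, ih (List.nodup_cons.mp hl).2]
    by_cases hP : P
    · by_cases hx : x = c
      · subst hx; simp [hP, hx']
      · simp [hP, hx, List.mem_cons, show ¬ c = x from fun h => hx h.symm]
    · simp [hP]

theorem sum_point' (l : List Int) (hl : l.Nodup) (c : Int) (P : Prop) [Decidable P] (w : Int → Int) :
    (l.map (fun x => if x = c ∧ P then w x else 0)).sum = if c ∈ l ∧ P then w c else 0 := by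
  have h : ∀ x, (if x = c ∧ P then w x else 0) = (if P ∧ x = c then w x else 0) := by
    intro x; by_cases hP : P <;> by_cases hx : x = c <;> simp [hP, hx]
  simp only [h]
  rw [sum_point l hl c P w]
  by_cases hP : P <;> by_cases hc : c ∈ l <;> simp [hP, hc]

theorem S_eval (arr : List (List Int)) (n m p q : Int)
    (hp : 0 ≤ p) (hp' : p < n) (hq : 0 ≤ q) (hq' : q < m) :
    ((PySem.List.pyRange 0 n 1).map (fun i =>
      ((PySem.List.pyRange 0 m 1).map (fun j => contrib arr i j p q)).sum)).sum
    = (if p + 1 < n then cell arr (p + 1) q else 0)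
      + (if 0 < p then cell arr (p - 1) q else 0)
      + (if q + 1 < m then cell arr p (q + 1) else 0)
      + (if 0 < q then cell arr p (q - 1) else 0) := by
  unfold contrib
  simp only [PySem.List.sum_map_add_int]
  have ndm := PySem.List.nodup_pyRange_one 0 m
  have ndn := PySem.List.nodup_pyRange_one 0 n
  have e1 : ∀ i : Int, ((PySem.List.pyRange 0 m 1).map (fun j => if i = p + 1 ∧ j = q then cell arr i j else 0)).sum
      = if i = p + 1 ∧ q ∈ PySem.List.pyRange 0 m 1 then cell arr i q else 0 :=
    fun i => sum_point _ ndm q _ (cell arr i)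
  have e2 : ∀ i : Int, ((PySem.List.pyRange 0 m 1).map (fun j => if i = p - 1 ∧ j = q then cell arr i j else 0)).sum
      = if i = p - 1 ∧ q ∈ PySem.List.pyRange 0 m 1 then cell arr i q else 0 :=
    fun i => sum_point _ ndm q _ (cell arr i)
  have e3 : ∀ i : Int, ((PySem.List.pyRange 0 m 1).map (fun j => if i = p ∧ j = q + 1 then cell arr i j else 0)).sum
      = if i = p ∧ q + 1 ∈ PySem.List.pyRange 0 m 1 then cell arr i (q + 1) else 0 :=
    fun i => sum_point _ ndm (q + 1) _ (cell arr i)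
  have e4 : ∀ i : Int, ((PySem.List.pyRange 0 m 1).map (fun j => if i = p ∧ j = q - 1 then cell arr i j else 0)).sum
      = if i = p ∧ q - 1 ∈ PySem.List.pyRange 0 m 1 then cell arr i (q - 1) else 0 :=
    fun i => sum_point _ ndm (q - 1) _ (cell arr i)
  simp only [e1, e2, e3, e4]
  rw [sum_point' _ ndn (p + 1) _ (fun i => cell arr i q),
      sum_point' _ ndn (p - 1) _ (fun i => cell arr i q),
      sum_point' _ ndn p _ (fun i => cell arr i (q + 1)),
      sum_point' _ ndn p _ (fun i => cell arr i (q - 1))]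
  simp only [PySem.List.mem_pyRange_one]
  split_ifs <;> omega

theorem tot0_shape (arr : List (List Int)) (n m : Int) :
    Shape ((PySem.List.pyRange 0 n 1).map (fun i =>
      (PySem.List.pyRange 0 m 1).map (fun j =>
        PySem.List.pyGetD (PySem.List.pyGetD arr i []) j 0))) n m := by
  constructor
  · simp [PySem.List.length_pyRange_one]
  · intro r hr
    obtain ⟨i, _, rfl⟩ := List.mem_map.mp hr
    simp [PySem.List.length_pyRange_one]

theorem tot0_cell (arr : List (List Int)) (n m p q : Int)
    (hp : 0 ≤ p) (hp' : p < n) (hq : 0 ≤ q) (hq' : q < m) :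
    cell ((PySem.List.pyRange 0 n 1).map (fun i =>
      (PySem.List.pyRange 0 m 1).map (fun j =>
        PySem.List.pyGetD (PySem.List.pyGetD arr i []) j 0))) p q = cell arr p q := by
  unfold cell
  rw [PySem.List.pyGetD_map_pyRange_of_nonneg _ n p _ hp hp',
      PySem.List.pyGetD_map_pyRange_of_nonneg _ m q _ hq hq']

theorem grid_ext (g : List (List Int)) (n m : Int) (t : Int → Int → Int)
    (hS : Shape g n m)
    (h : ∀ p q, 0 ≤ p → p < n → 0 ≤ q → q < m → cell g p q = t p q) :
    g = (PySem.List.pyRange 0 n 1).map (fun i => (PySem.List.pyRange 0 m 1).map (fun j => t i j)) := by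
  obtain ⟨hlen, hrow⟩ := hS
  apply List.ext_getElem
  · simp [hlen, PySem.List.length_pyRange_one]
  · intro k hk hk'
    have hkn : (k : Int) < n := by
      have := hk; rw [hlen] at this; omega
    rw [List.getElem_map, PySem.List.getElem_pyRange_one, zero_add]
    have hrk : g[k].length = m.toNat := hrow _ (List.getElem_mem hk)
    apply List.ext_getElem
    · simp [hrk, PySem.List.length_pyRange_one]
    · intro l hl hl'
      have hlm : (l : Int) < m := by
        have := hl; rw [hrk] at this; omega
      rw [List.getElem_map, PySem.List.getElem_pyRange_one, zero_add]
      have hc : cell g (k : Int) (l : Int) = g[k][l] := by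
        unfold cell
        rw [PySem.List.pyGetD_eq_getElem _ _ (Int.natCast_nonneg k) (by exact_mod_cast hk),
            PySem.List.pyGetD_eq_getElem _ _ (Int.natCast_nonneg l) (by simp [Int.toNat_natCast]; exact_mod_cast hl)]
        simp
      rw [← hc]
      exact h (k : Int) (l : Int) (Int.natCast_nonneg k) hkn (Int.natCast_nonneg l) hlm

theorem B_eq (arr : List (List Int)) (n m : Int) :
    max_ballon_alt arr n m = loopMax (fun i j => TB arr n m i j) n m := by
  show ((PySem.List.pyRange 0 n 1).foldl
      (fun tot i => (PySem.List.pyRange 0 m 1).foldl (fun tot j => stepB arr n m tot i j) tot)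
      ((PySem.List.pyRange 0 n 1).map (fun i => (PySem.List.pyRange 0 m 1).map (fun j =>
        PySem.List.pyGetD (PySem.List.pyGetD arr i []) j 0)))).foldl
      (fun best row => row.foldl (fun best x => if x > best then x else best) best) 0
    = loopMax (fun i j => TB arr n m i j) n m
  have hbnd : ∀ i ∈ PySem.List.pyRange 0 n 1, 0 ≤ i ∧ i < n := by
    intro i hi; exact PySem.List.mem_pyRange_one.mp hi
  obtain ⟨hSf, hCf⟩ := outer_inv arr n m (PySem.List.pyRange 0 n 1) _ (tot0_shape arr n m) hbnd
  have key := grid_ext _ n m (fun i j => TB arr n m i j) hSf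
    (fun p q hp hp' hq hq' => by
      rw [hCf p q hp hp' hq hq', tot0_cell arr n m p q hp hp' hq hq',
          S_eval arr n m p q hp hp' hq hq']
      unfold TB; ring)
  rw [key]
  simp only [List.foldl_map]
  rfl

theorem A_eq (arr : List (List Int)) (n m : Int) :
    max_ballon arr n m = loopMax (fun i j => TA arr n m i j) n m := by
  have hR4 : PySem.List.pyRange 0 4 1 = [0, 1, 2, 3] := by decide
  have d0 : PySem.List.pyGetD ([-1, 1, 0, 0] : List Int) 0 0 = -1 := by decide
  have d1 : PySem.List.pyGetD ([-1, 1, 0, 0] : List Int) 1 0 = 1 := by decide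
  have d2 : PySem.List.pyGetD ([-1, 1, 0, 0] : List Int) 2 0 = 0 := by decide
  have d3 : PySem.List.pyGetD ([-1, 1, 0, 0] : List Int) 3 0 = 0 := by decide
  have e0 : PySem.List.pyGetD ([0, 0, -1, 1] : List Int) 0 0 = 0 := by decide
  have e1 : PySem.List.pyGetD ([0, 0, -1, 1] : List Int) 1 0 = 0 := by decide
  have e2 : PySem.List.pyGetD ([0, 0, -1, 1] : List Int) 2 0 = -1 := by decide
  have e3 : PySem.List.pyGetD ([0, 0, -1, 1] : List Int) 3 0 = 1 := by decide
  simp only [max_ballon, loopMax, hR4, List.foldl_cons, List.foldl_nil,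
    d0, d1, d2, d3, e0, e1, e2, e3]
  apply PySem.List.foldl_congr_mem
  intro acc i _
  apply PySem.List.foldl_congr_mem
  intro acc2 j _
  rfl

theorem TA_eq_TB (arr : List (List Int)) (n m i j : Int)
    (hi : 0 ≤ i) (hi' : i < n) (hj : 0 ≤ j) (hj' : j < m) :
    TA arr n m i j = TB arr n m i j := by
  have e : ∀ x : Int, x + -1 = x - 1 := fun x => by ring
  unfold TA TB is_valid
  simp only [e, add_zero, Bool.and_eq_true, decide_eq_true_eq]
  split_ifs <;> omega

theorem loopMax_congr (t t' : Int → Int → Int) (n m : Int)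
    (h : ∀ i j, 0 ≤ i → i < n → 0 ≤ j → j < m → t i j = t' i j) :
    loopMax t n m = loopMax t' n m := by
  unfold loopMax
  apply PySem.List.foldl_congr_mem
  intro acc i hi
  apply PySem.List.foldl_congr_mem
  intro acc2 j hj
  obtain ⟨hi0, hi1⟩ := PySem.List.mem_pyRange_one.mp hi
  obtain ⟨hj0, hj1⟩ := PySem.List.mem_pyRange_one.mp hj
  rw [h i j hi0 hi1 hj0 hj1]

-- ===== VERDICT (by name: the statement is the Claim_ definition above) =====
theorem max_ballon_spec : Claim_equal_max_ballon := by
  intro arr n m _ _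
  unfold Spec_max_ballon
  rw [A_eq, B_eq]
  exact loopMax_congr _ _ n m (fun i j hi hi' hj hj' => TA_eq_TB arr n m i j hi hi' hj hj')
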